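-- pv_equiv track=rewrite | github.com/fayaz-cusat/PythonLab | Cycle1/Q5.py | get_kn_dist
-- ===== SOURCE A (Python) =====
-- def get_substrings_k(string, k):
-- 	res = []
-- 	n = len(string)
-- 	for i in range(n):
-- 		if (i + k) <= n:
-- 			res.append(string[i : i + k])
-- 	return res
--
-- def get_kn_dist(string, k, n):
-- 	res = []
-- 	for substring in get_substrings_k(string, k):
-- 		elems = []
-- 		for char in substring:
-- 			if char not in elems:
-- 				elems.append(char)
-- 		if len(elems) == n:
-- 			res.append(substring)
-- 	return res
-- ===== SOURCE B (Python) =====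
-- def get_kn_dist(string, k, n):
--     # Sliding window: one pass with a running char-frequency map and distinct count.
--     if k < 0:
--         return []
--     res = []
--     freq = {}
--     distinct = 0
--     for j, c in enumerate(string):
--         freq[c] = freq.get(c, 0) + 1
--         if freq[c] == 1:
--             distinct += 1
--         if j >= k:
--             d = string[j - k]
--             freq[d] = freq[d] - 1
--             if freq[d] == 0:
--                 distinct -= 1
--         if j >= k - 1 and distinct == n:
--             res.append(string[j - k + 1 : j + 1])
--     return res
-- ===== Notes on version B (the rewrite author's own statement) =====
-- stated objective: faster
-- what changed: A re-slices every length-k window and deduplicates each with a quadratic membership-list scan; B makes one sliding-window pass keeping a char-frequency dict and a running distinct count, emitting a window only when the count equals n.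
-- outside the precondition, e.g. on get_kn_dist('ab', -1, 1): A returns ['a'], B returns []
import Mathlib
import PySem

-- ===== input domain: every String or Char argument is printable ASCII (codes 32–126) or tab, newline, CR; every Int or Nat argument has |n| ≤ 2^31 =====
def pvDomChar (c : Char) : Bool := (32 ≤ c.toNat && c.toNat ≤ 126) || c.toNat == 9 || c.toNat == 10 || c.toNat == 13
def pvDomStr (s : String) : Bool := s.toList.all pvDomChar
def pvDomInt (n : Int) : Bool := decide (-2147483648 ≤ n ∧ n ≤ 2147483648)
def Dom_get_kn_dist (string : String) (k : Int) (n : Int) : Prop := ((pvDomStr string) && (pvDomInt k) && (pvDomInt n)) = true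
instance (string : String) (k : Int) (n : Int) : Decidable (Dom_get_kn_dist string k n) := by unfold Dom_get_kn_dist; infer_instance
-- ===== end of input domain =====

-- B replaces A's per-window re-slicing and list-scan deduplication by a single sliding-window
-- pass with a char-frequency dict and a running distinct count (objective: faster).


-- ===== PORT A =====
def get_substrings_k (string : String) (k : Int) : List String :=
  let n : Int := PySem.Str.len string
  (PySem.List.pyRange 0 n 1).foldl
    (fun res i =>
      if i + k ≤ n then res ++ [PySem.Str.slice string (some i) (some (i + k))] else res)
    []
def get_kn_dist (string : String) (k : Int) (n : Int) : List String :=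
  (get_substrings_k string k).foldl
    (fun res substring =>
      let elems := substring.toList.foldl
        (fun elems char => if char ∉ elems then elems ++ [char] else elems) []
      if (elems.length : Int) = n then res ++ [substring] else res)
    []


-- ===== PORT B =====
def get_kn_dist_alt (string : String) (k : Int) (n : Int) : List String :=
  if k < 0 then []
  else
    ((PySem.List.enumerate string.toList 0).foldl
      (fun (st : List String × PySem.Dict Char Int × Int) (jc : Int × Char) =>
        let res := st.1
        let j := jc.1
        let c := jc.2
        let freq1 := st.2.1.insert c (st.2.1.getD c 0 + 1)
        let dist1 := if freq1.getD c 0 = 1 then st.2.2 + 1 else st.2.2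
        let fd :=
          if k ≤ j then
            let d := PySem.List.pyGetD string.toList (j - k) ' '
            let freq2 := freq1.insert d (freq1.getD d 0 - 1)
            (freq2, if freq2.getD d 0 = 0 then dist1 - 1 else dist1)
          else (freq1, dist1)
        let res' :=
          if k - 1 ≤ j ∧ fd.2 = n then
            res ++ [PySem.Str.slice string (some (j - k + 1)) (some (j + 1))]
          else res
        (res', fd.1, fd.2))
      ([], PySem.Dict.empty, 0)).1


-- ===== PRECONDITION & SPEC =====
-- Pre_ excludes negative k, on which A still returns values: the kept "substrings" there are
-- artefacts of Python's negative-slice arithmetic (string[i:i+k] with i+k < i), an accidental corner.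
def Pre_get_kn_dist (string : String) (k : Int) (n : Int) : Prop := 0 ≤ k
instance (string : String) (k : Int) (n : Int) : Decidable (Pre_get_kn_dist string k n) := by
  unfold Pre_get_kn_dist; infer_instance

def pvWitness_get_kn_dist : String × Int × Int := ("abac", 3, 2)

def Spec_get_kn_dist (string : String) (k : Int) (n : Int) (out : List String) : Prop := out = get_kn_dist_alt string k n
instance (string : String) (k : Int) (n : Int) (out : List String) : Decidable (Spec_get_kn_dist string k n out) := by unfold Spec_get_kn_dist; infer_instance

-- ===== CLAIM (what is proved, stated in full; the proofs are below) =====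
def Claim_equal_get_kn_dist : Prop := ∀ (string : String) (k : Int) (n : Int), Dom_get_kn_dist string k n → Pre_get_kn_dist string k n → Spec_get_kn_dist string k n (get_kn_dist string k n)

-- ===== LEMMAS AND PROOFS =====
def pvWin (cs : List Char) (K p : Nat) : List Char := (cs.drop p).take K

theorem pv_filter_range_le (K M : Nat) :
    ∀ N : Nat, (List.range N).filter (fun i => decide (i + K ≤ M)) = List.range (min N (M + 1 - K)) := by
  intro N
  induction N with
  | zero => simp
  | succ N ih =>
    rw [List.range_succ, List.filter_append, ih]
    by_cases h : N + K ≤ M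
    · have : min (N+1) (M+1-K) = min N (M+1-K) + 1 := by omega
      rw [this, List.range_succ]
      simp [h]
      omega
    · have : min (N+1) (M+1-K) = min N (M+1-K) := by omega
      rw [this]
      simp [h]

theorem pv_foldl_append_if {α β : Type} (p : α → Prop) [DecidablePred p] (f : α → β) (l : List α) (acc : List β) :
    l.foldl (fun acc x => if p x then acc ++ [f x] else acc) acc = acc ++ (l.filter (fun x => decide (p x))).map f := by
  rw [← PySem.List.foldl_append_if (p := fun x => decide (p x)) (f := f)]
  simp

theorem subs_eq (s : String) (k : Int) (hk : 0 ≤ k) :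
    get_substrings_k s k =
      (List.range (s.toList.length - (k.toNat - 1))).map
        (fun p => String.ofList (pvWin s.toList k.toNat p)) := by
  have hkK : k = (k.toNat : Int) := by omega
  simp only [get_substrings_k]
  rw [PySem.List.pyRange_one]
  simp only [PySem.Str.len, zero_add, Int.sub_zero, Int.toNat_natCast, List.foldl_map]
  refine (pv_foldl_append_if (fun (i : Nat) => (i : Int) + k ≤ (s.toList.length : Int))
      (fun (i : Nat) => PySem.Str.slice s (some (i : Int)) (some ((i : Int) + k)))
      (List.range s.toList.length) []).trans ?_
  have hfil : (List.range s.toList.length).filter (fun (i : Nat) => decide ((i : Int) + k ≤ (s.toList.length : Int)))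
      = List.range (s.toList.length - (k.toNat - 1)) := by
    have he : (fun (i : Nat) => decide ((i : Int) + k ≤ (s.toList.length : Int)))
        = (fun i => decide (i + k.toNat ≤ s.toList.length)) := by
      funext i; rw [hkK]; simp; constructor <;> intro h <;> omega
    rw [he, pv_filter_range_le]
    congr 1
    omega
  rw [hfil, List.nil_append]
  apply List.map_congr_left
  intro p hp
  have h2 : (p : Int) + k = ((p : Int) + (k.toNat : Int)) := by omega
  rw [h2]
  have h3 : PySem.Str.slice s (some (p:Int)) (some ((p:Int) + (k.toNat:Int)))
      = String.ofList (PySem.List.slice s.toList (some (p:Int)) (some ((p:Int)+(k.toNat:Int)))) := by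
    simp [PySem.Str.slice, PySem.Chars.slice_eq_listSlice]
  rw [h3, PySem.List.slice_natCast_add]
  rfl

def pvDS (w : List Char) : Int := ((PySem.Set.ofList w).length : Int)

def pvCanon (cs : List Char) (K : Nat) (n : Int) : List String :=
  ((List.range (cs.length - (K - 1))).filter (fun p => decide (pvDS (pvWin cs K p) = n))).map
    (fun p => String.ofList (pvWin cs K p))

theorem pv_elems_eq (l : List Char) :
    l.foldl (fun e ch => if ch ∉ e then e ++ [ch] else e) [] = PySem.Set.ofList l := by
  rw [PySem.Set.ofList_eq_foldl]
  have h : (fun (e : List Char) ch => if ch ∉ e then e ++ [ch] else e) = PySem.Set.add := by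
    funext e ch
    rw [PySem.Set.add_eq_ite]
    by_cases h : ch ∈ e <;> simp [h]
  rw [h]

theorem pv_elems_eq' (l : List Char) :
    l.foldl (fun e ch => if ch ∈ e then e else e ++ [ch]) [] = PySem.Set.ofList l := by
  rw [← pv_elems_eq]
  congr 1
  funext e ch
  by_cases h : ch ∈ e <;> simp [h]

theorem pv_A_eq_canon (s : String) (k n : Int) (hk : 0 ≤ k) :
    get_kn_dist s k n = pvCanon s.toList k.toNat n := by
  unfold get_kn_dist
  rw [subs_eq s k hk, List.foldl_map]
  refine (pv_foldl_append_if
      (fun (q : Nat) => (((((String.ofList (pvWin s.toList k.toNat q)).toList.foldl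
          (fun e ch => if ch ∉ e then e ++ [ch] else e) []).length : Nat) : Int) = n))
      (fun q => String.ofList (pvWin s.toList k.toNat q))
      (List.range (s.toList.length - (k.toNat - 1))) []).trans ?_
  rw [List.nil_append]
  unfold pvCanon
  congr 1
  apply List.filter_congr
  intro q hq
  simp [String.toList_ofList, pv_elems_eq', pvDS]
def pvWnd (cs : List Char) (K t : Nat) : List Char := (cs.take t).drop (t - K)
def pvRes (cs : List Char) (K : Nat) (n : Int) (t : Nat) : List String :=
  ((List.range t).filter (fun j => decide (K ≤ j + 1 ∧ pvDS (pvWnd cs K (j + 1)) = n))).map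
    (fun j => String.ofList (pvWnd cs K (j + 1)))

def pvStep (string : String) (k n : Int) :
    List String × PySem.Dict Char Int × Int → Int × Char → List String × PySem.Dict Char Int × Int :=
  fun st jc =>
    let res := st.1
    let j := jc.1
    let c := jc.2
    let freq1 := st.2.1.insert c (st.2.1.getD c 0 + 1)
    let dist1 := if freq1.getD c 0 = 1 then st.2.2 + 1 else st.2.2
    let fd :=
      if k ≤ j then
        let d := PySem.List.pyGetD string.toList (j - k) ' '
        let freq2 := freq1.insert d (freq1.getD d 0 - 1)
        (freq2, if freq2.getD d 0 = 0 then dist1 - 1 else dist1)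
      else (freq1, dist1)
    let res' :=
      if k - 1 ≤ j ∧ fd.2 = n then
        res ++ [PySem.Str.slice string (some (j - k + 1)) (some (j + 1))]
      else res
    (res', fd.1, fd.2)

theorem pvB_eq_fold (s : String) (k n : Int) (hk : 0 ≤ k) :
    get_kn_dist_alt s k n =
      ((PySem.List.enumerate s.toList 0).foldl (pvStep s k n) ([], PySem.Dict.empty, 0)).1 := by
  rw [get_kn_dist_alt, if_neg (by omega)]
  rfl

-- window lemmas
theorem pv_wnd_succ (cs : List Char) (K t : Nat) (ht : t < cs.length) :
    (cs.take (t + 1)).drop (t - K) = pvWnd cs K t ++ [cs[t]] := by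
  rw [List.take_succ_eq_append_getElem ht,
    List.drop_append_of_le_length (by simp; omega)]
  rfl

theorem pv_wnd_shift (cs : List Char) (K t : Nat) (hKt : K ≤ t) (ht : t < cs.length) :
    pvWnd cs K t ++ [cs[t]] = cs[t - K] :: pvWnd cs K (t + 1) := by
  rw [← pv_wnd_succ cs K t ht]
  have hlen : t - K < (cs.take (t + 1)).length := by simp; omega
  rw [List.drop_eq_getElem_cons hlen]
  congr 1
  · exact List.getElem_take
  · unfold pvWnd
    congr 1
    omega

theorem pv_wnd_keep (cs : List Char) (K t : Nat) (hKt : t < K) (ht : t < cs.length) :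
    pvWnd cs K t ++ [cs[t]] = pvWnd cs K (t + 1) := by
  rw [← pv_wnd_succ cs K t ht]
  unfold pvWnd
  congr 1
  omega

theorem pv_wnd_win (cs : List Char) (K t : Nat) (hK : K ≤ t + 1) :
    pvWnd cs K (t + 1) = pvWin cs K (t + 1 - K) := by
  unfold pvWnd pvWin
  rw [List.drop_take]
  congr 1
  omega

theorem pv_pvRes_succ (cs : List Char) (K : Nat) (n : Int) (t : Nat) :
    pvRes cs K n (t + 1) = pvRes cs K n t ++
      (if K ≤ t + 1 ∧ pvDS (pvWnd cs K (t + 1)) = n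
        then [String.ofList (pvWnd cs K (t + 1))] else []) := by
  unfold pvRes
  rw [List.range_succ, List.filter_append, List.map_append]
  congr 1
  by_cases h : K ≤ t + 1 ∧ pvDS (pvWnd cs K (t + 1)) = n <;> simp [h]

theorem pv_countP_not (s : List Char) (p : Char → Bool) :
    s.countP p + s.countP (fun y => !p y) = s.length := by
  induction s with
  | nil => simp
  | cons a s ih => by_cases h : p a <;> simp [h] <;> omega

theorem pv_discard_len (s : List Char) (d : Char) (h : s.Nodup) :
    (((PySem.Set.discard s d).length : Nat) : Int) = (s.length : Int) - (if d ∈ s then 1 else 0) := by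
  by_cases hm : d ∈ s
  · have h1 : (PySem.Set.discard s d).length = s.countP (fun y => !(y == d)) := by
      rw [PySem.Set.discard, ← List.countP_eq_length_filter]
    have h2 : s.countP (fun y => (y == d)) = 1 := List.count_eq_one_of_mem h hm
    have h3 : s.countP (fun y => (y == d)) + s.countP (fun y => !(y == d)) = s.length :=
      pv_countP_not s (fun y => (y == d))
    simp [hm, h1]
    omega
  · have he : PySem.Set.discard s d = s := by
      rw [PySem.Set.discard, List.filter_eq_self]
      intro a ha
      simp
      exact fun had => hm (had ▸ ha)
    rw [he]
    simp [hm]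

theorem pvDS_append (w : List Char) (c : Char) :
    pvDS (w ++ [c]) = pvDS w + (if c ∈ w then 0 else 1) := by
  unfold pvDS
  rw [PySem.Set.ofList_append_singleton]
  by_cases h : c ∈ w
  · rw [PySem.Set.add_of_mem ((PySem.Set.mem_ofList w c).2 h)]
    simp [h]
  · rw [PySem.Set.add_of_not_mem (fun hc => h ((PySem.Set.mem_ofList w c).1 hc))]
    simp [h]

theorem pvDS_cons (d : Char) (w : List Char) :
    pvDS (d :: w) = pvDS w + (if d ∈ w then 0 else 1) := by
  unfold pvDS
  rw [PySem.Set.ofList_cons]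
  have hd := pv_discard_len (PySem.Set.ofList w) d (PySem.Set.nodup_ofList w)
  simp only [PySem.Set.mem_ofList] at hd
  simp only [List.length_cons]
  push_cast
  rw [hd]
  by_cases h : d ∈ w <;> simp [h]

theorem pv_slice_str (s : String) (k : Int) (t : Nat) (hk : 0 ≤ k) (hK : k.toNat ≤ t + 1) :
    PySem.Str.slice s (some ((t : Int) - k + 1)) (some ((t : Int) + 1))
      = String.ofList (pvWnd s.toList k.toNat (t + 1)) := by
  have h1 : (t : Int) - k + 1 = ((t + 1 - k.toNat : Nat) : Int) := by omega
  have h2 : (t : Int) + 1 = ((t + 1 - k.toNat : Nat) : Int) + ((k.toNat : Nat) : Int) := by omega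
  rw [h1, h2, PySem.Str.slice]
  rw [pv_wnd_win s.toList k.toNat t hK]
  congr 1
  rw [PySem.Chars.slice_eq_listSlice, PySem.List.slice_natCast_add]
  rfl

theorem pv_step (s : String) (k n : Int) (hk : 0 ≤ k) (t : Nat) (ht : t < s.toList.length)
    (st : List String × PySem.Dict Char Int × Int)
    (hres : st.1 = pvRes s.toList k.toNat n t)
    (hfreq : ∀ c, st.2.1.getD c 0 = (((pvWnd s.toList k.toNat t).count c : Nat) : Int))
    (hdist : st.2.2 = pvDS (pvWnd s.toList k.toNat t)) :
    (pvStep s k n st ((t : Int), s.toList[t])).1 = pvRes s.toList k.toNat n (t + 1)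
    ∧ (∀ c, (pvStep s k n st ((t : Int), s.toList[t])).2.1.getD c 0
        = (((pvWnd s.toList k.toNat (t + 1)).count c : Nat) : Int))
    ∧ (pvStep s k n st ((t : Int), s.toList[t])).2.2 = pvDS (pvWnd s.toList k.toNat (t + 1)) := by
  set cs := s.toList with hcs
  set K := k.toNat with hKdef
  set c := cs[t] with hcdef
  set w := pvWnd cs K t with hw
  -- the enlarged window
  set u := w ++ [c] with hu
  unfold pvStep
  simp only
  set freq1 := st.2.1.insert c (st.2.1.getD c 0 + 1) with hfreq1def
  have hfreq1 : ∀ c', freq1.getD c' 0 = ((u.count c' : Nat) : Int) := by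
    intro c'
    rw [hfreq1def, PySem.Dict.getD_insert]
    by_cases hcc : c' = c
    · rw [if_pos hcc, hcc, hfreq c, hu]
      simp [List.count_append]
    · rw [if_neg hcc, hfreq c', hu]
      have hcc' : ¬(c = c') := fun h => hcc h.symm
      simp [List.count_append, hcc, hcc']
  have hdist1 : (if freq1.getD c 0 = 1 then st.2.2 + 1 else st.2.2) = pvDS u := by
    rw [hfreq1 c, hdist, hu, pvDS_append]
    by_cases hmem : c ∈ w
    · rw [if_neg, if_pos hmem]
      · ring
      · have : w.count c ≠ 0 := by
          rw [Ne, List.count_eq_zero]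
          simpa using hmem
        simp [List.count_append]
        omega
    · rw [if_pos, if_neg hmem]
      have : w.count c = 0 := List.count_eq_zero.2 hmem
      simp [List.count_append, this]
  by_cases hKt : k ≤ (t : Int)
  · -- removal branch
    have hKt' : K ≤ t := by omega
    rw [if_pos hKt]
    simp only
    have hd : PySem.List.pyGetD cs ((t : Int) - k) ' ' = cs[t - K] := by
      rw [PySem.List.pyGetD_eq_getElem cs ' ' (by omega) (by push_cast; omega)]
      congr 1
      omega
    rw [hd]
    set d := cs[t - K] with hddef
    have hshift : u = d :: pvWnd cs K (t + 1) := by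
      rw [hu, hw]
      exact pv_wnd_shift cs K t hKt' ht
    set freq2 := freq1.insert d (freq1.getD d 0 - 1) with hfreq2def
    have hfreq2 : ∀ c', freq2.getD c' 0 = (((pvWnd cs K (t + 1)).count c' : Nat) : Int) := by
      intro c'
      rw [hfreq2def, PySem.Dict.getD_insert]
      by_cases hcc : c' = d
      · rw [if_pos hcc, hcc, hfreq1 d, hshift]
        simp [List.count_cons]
      · rw [if_neg hcc, hfreq1 c', hshift]
        have hcc' : ¬(d = c') := fun h => hcc h.symm
        simp [List.count_cons, hcc, hcc']
    have hdist2 : (if freq2.getD d 0 = 0 then pvDS u - 1 else pvDS u)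
        = pvDS (pvWnd cs K (t + 1)) := by
      rw [hfreq2 d, hshift, pvDS_cons]
      by_cases hmem : d ∈ pvWnd cs K (t + 1)
      · rw [if_neg, if_pos hmem]
        · ring
        · have : (pvWnd cs K (t + 1)).count d ≠ 0 := by
            rw [Ne, List.count_eq_zero]
            simpa using hmem
          simp
          omega
      · have h0 : (((pvWnd cs K (t + 1)).count d : Nat) : Int) = 0 := by
          rw [List.count_eq_zero.2 hmem]
          rfl
        rw [if_pos h0, if_neg hmem]
        ring
    rw [hdist1, hdist2]
    refine ⟨?_, hfreq2, rfl⟩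
    -- result component
    rw [hres, pv_pvRes_succ]
    by_cases hcond : K ≤ t + 1 ∧ pvDS (pvWnd cs K (t + 1)) = n
    · rw [if_pos (show k - 1 ≤ (t : Int) ∧ pvDS (pvWnd cs K (t + 1)) = n from
          ⟨by omega, hcond.2⟩), if_pos hcond]
      rw [pv_slice_str s k t hk hcond.1]
    · rw [if_neg (fun hcon => hcond ⟨by omega, hcon.2⟩), if_neg hcond]
      simp [hcs]
  · -- no removal
    have hKt' : t < K := by omega
    rw [if_neg hKt]
    simp only
    have hkeep : u = pvWnd cs K (t + 1) := by
      rw [hu, hw]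
      exact pv_wnd_keep cs K t hKt' ht
    rw [hdist1, hkeep]
    refine ⟨?_, fun c' => by rw [hfreq1 c', hkeep], rfl⟩
    rw [hres, pv_pvRes_succ]
    by_cases hcond : K ≤ t + 1 ∧ pvDS (pvWnd cs K (t + 1)) = n
    · rw [if_pos (show k - 1 ≤ (t : Int) ∧ pvDS (pvWnd cs K (t + 1)) = n from
          ⟨by omega, hcond.2⟩), if_pos hcond]
      rw [pv_slice_str s k t hk hcond.1]
    · rw [if_neg (fun hcon => hcond ⟨by omega, hcon.2⟩), if_neg hcond]
      simp [hcs]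

theorem pv_filter_range_ge (c : Nat) :
    ∀ N : Nat, (List.range N).filter (fun j => decide (c ≤ j)) = (List.range (N - c)).map (· + c) := by
  intro N
  induction N with
  | zero => simp
  | succ N ih =>
    rw [List.range_succ, List.filter_append, ih]
    by_cases h : c ≤ N
    · have h2 : N + 1 - c = (N - c) + 1 := by omega
      rw [h2, List.range_succ]
      simp [h] <;> omega
    · have h2 : N + 1 - c = 0 := by omega
      simp [h, h2] <;> omega

theorem pv_wnd_index (cs : List Char) (K : Nat) (p : Nat) :
    pvWnd cs K (p + (K - 1) + 1) = pvWin cs K p := by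
  by_cases hK : K = 0
  · subst hK
    unfold pvWnd pvWin
    simp
  · have h1 : p + (K - 1) + 1 = p + K := by omega
    rw [h1]
    unfold pvWnd pvWin
    have e1 : p + K - K = p := by omega
    rw [List.drop_take, e1]
    have e2 : p + K - p = K := by omega
    rw [e2]

theorem pv_pvRes_eq_canon (cs : List Char) (K : Nat) (n : Int) :
    pvRes cs K n cs.length = pvCanon cs K n := by
  unfold pvRes pvCanon
  have hsplit : (fun j => decide (K ≤ j + 1 ∧ pvDS (pvWnd cs K (j + 1)) = n))
      = fun j => decide (pvDS (pvWnd cs K (j + 1)) = n) && decide (K - 1 ≤ j) := by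
    funext j
    by_cases h1 : K ≤ j + 1
    · by_cases h2 : pvDS (pvWnd cs K (j + 1)) = n <;> simp [h1, h2] <;> omega
    · simp [h1]
      all_goals omega
  rw [hsplit, ← List.filter_filter, pv_filter_range_ge, List.filter_map, List.map_map]
  congr 1
  · funext p
    simp [Function.comp, pv_wnd_index]
  · apply List.filter_congr
    intro p hp
    simp [Function.comp, pv_wnd_index]

theorem pv_inv (s : String) (k n : Int) (hk : 0 ≤ k) :
    ∀ t : Nat, t ≤ s.toList.length →
      ((((PySem.List.enumerate s.toList 0).take t).foldl (pvStep s k n)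
          ([], PySem.Dict.empty, 0)).1 = pvRes s.toList k.toNat n t)
      ∧ (∀ c, (((PySem.List.enumerate s.toList 0).take t).foldl (pvStep s k n)
          ([], PySem.Dict.empty, 0)).2.1.getD c 0
            = (((pvWnd s.toList k.toNat t).count c : Nat) : Int))
      ∧ ((((PySem.List.enumerate s.toList 0).take t).foldl (pvStep s k n)
          ([], PySem.Dict.empty, 0)).2.2 = pvDS (pvWnd s.toList k.toNat t)) := by
  intro t
  induction t with
  | zero =>
    intro _
    refine ⟨by simp [pvRes], fun c => by simp [pvWnd, PySem.Dict.getD_empty], by simp [pvWnd, pvDS]⟩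
  | succ t ih =>
    intro ht
    have ht' : t < s.toList.length := by omega
    have htake : (PySem.List.enumerate s.toList 0).take (t + 1)
        = (PySem.List.enumerate s.toList 0).take t ++ [((t : Int), s.toList[t])] := by
      rw [List.take_succ_eq_append_getElem (by rw [PySem.List.length_enumerate]; exact ht')]
      congr 1
      rw [PySem.List.getElem_enumerate]
      simp
    rw [htake, List.foldl_append]
    simp only [List.foldl_cons, List.foldl_nil]
    exact pv_step s k n hk t ht' _ (ih (by omega)).1 (ih (by omega)).2.1 (ih (by omega)).2.2

theorem pv_B_eq_canon (s : String) (k n : Int) (hk : 0 ≤ k) :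
    get_kn_dist_alt s k n = pvCanon s.toList k.toNat n := by
  rw [pvB_eq_fold s k n hk]
  have h := (pv_inv s k n hk s.toList.length le_rfl).1
  have hfull : (PySem.List.enumerate s.toList 0).take s.toList.length
      = PySem.List.enumerate s.toList 0 :=
    List.take_of_length_le (by rw [PySem.List.length_enumerate])
  rw [← pv_pvRes_eq_canon, ← h, hfull]

-- ===== VERDICT (by name: the statement is the Claim_ definition above) =====
theorem get_kn_dist_spec : Claim_equal_get_kn_dist := by
  intro s k n _ hk
  unfold Spec_get_kn_dist
  rw [pv_A_eq_canon s k n hk, pv_B_eq_canon s k n hk]
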